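-- pv_equiv track=rewrite | github.com/nishchay96/syntheta-hub | python/services/memory_worker.py | _build_minimal_node
-- ===== SOURCE A (Python) =====
-- def _build_minimal_node(fact_summary: str, bucket_name: str) -> dict:
--     """Last-resort node when gate rejects everything."""
--     if bucket_name == "Work":
--         return {"Self": {"Detail": fact_summary[:80]}}
--     words = fact_summary.split()
--     candidates = [
--         w.strip('.,') for w in words
--         if w and w[0].isupper() and len(w) > 2
--         and w.lower() not in {'the', 'a', 'an', 'is', 'at', 'in', 'on',
--                                'was', 'has', 'had', 'been', 'have', 'i'}
--     ]
--     node_name = candidates[-1] if candidates else bucket_name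
--     return {node_name: {"Status": "Noted"}}
-- ===== SOURCE B (Python) =====
-- _STOPWORDS = {'the', 'a', 'an', 'is', 'at', 'in', 'on',
--               'was', 'has', 'had', 'been', 'have', 'i'}
--
--
-- def _build_minimal_node(fact_summary: str, bucket_name: str) -> dict:
--     """Last-resort node when gate rejects everything."""
--     if bucket_name == "Work":
--         return {"Self": {"Detail": fact_summary[:80]}}
--     for w in reversed(fact_summary.split()):
--         if w and w[0].isupper() and len(w) > 2 and w.lower() not in _STOPWORDS:
--             return {w.strip('.,'): {"Status": "Noted"}}
--     return {bucket_name: {"Status": "Noted"}}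
-- ===== Notes on version B (the rewrite author's own statement) =====
-- stated objective: alternative
-- what changed: Instead of building the full list of stripped candidate words and indexing its last element, B scans the words back-to-front and returns on the first qualifying word (early exit), falling back to the bucket name if none is found.
import Mathlib
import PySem

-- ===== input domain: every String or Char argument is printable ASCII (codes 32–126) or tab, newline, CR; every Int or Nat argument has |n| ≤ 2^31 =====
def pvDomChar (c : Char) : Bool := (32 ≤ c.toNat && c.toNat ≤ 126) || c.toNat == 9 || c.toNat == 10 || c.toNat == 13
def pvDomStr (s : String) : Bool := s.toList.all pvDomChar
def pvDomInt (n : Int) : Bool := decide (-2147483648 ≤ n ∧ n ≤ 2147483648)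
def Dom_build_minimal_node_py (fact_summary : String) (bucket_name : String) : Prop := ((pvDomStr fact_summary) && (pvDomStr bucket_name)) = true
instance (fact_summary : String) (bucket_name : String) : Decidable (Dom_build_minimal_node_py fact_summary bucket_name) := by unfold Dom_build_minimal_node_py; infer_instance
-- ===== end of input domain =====

-- B replaces A's full candidates list + last-element indexing by a back-to-front
-- scan over the words that returns on the first qualifying word (alternative decomposition).

-- shared by both ports: the stopword set and the word predicate (identical in both Pythons)
def pvStopwords : List String :=
  ["the", "a", "an", "is", "at", "in", "on", "was", "has", "had", "been", "have", "i"]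

-- w and w[0].isupper() and len(w) > 2 and w.lower() not in {…}
def pvPred (w : String) : Bool :=
  (w ≠ "" : Bool) &&
  (match PySem.Str.pyGet? w 0 with
   | some c => PySem.Chars.isupper c
   | none => false) &&
  (PySem.Str.len w > 2 : Bool) &&
  !(pvStopwords.contains (PySem.Str.lower w))

def pvStrip (w : String) : String := PySem.Str.stripChars w ".,"

-- ===== PORT A =====
def build_minimal_node_py (fact_summary : String) (bucket_name : String) : List (String × List (String × String)) :=
  if bucket_name == "Work" then
    [("Self", [("Detail", PySem.Str.slice fact_summary none (some 80))])]
  else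
    let words := PySem.Str.split₀ fact_summary
    let candidates := (words.filter pvPred).map pvStrip
    let node_name := match PySem.List.pyGet? candidates (-1) with
      | some c => c
      | none => bucket_name
    [(node_name, [("Status", "Noted")])]

-- ===== PORT B =====
-- reverse scan with early exit: first qualifying word from the end, stripped at return
def pvFindBack : List String → Option String
  | [] => none
  | w :: rest => if pvPred w then some (pvStrip w) else pvFindBack rest

def build_minimal_node_py_alt (fact_summary : String) (bucket_name : String) : List (String × List (String × String)) :=
  if bucket_name == "Work" then
    [("Self", [("Detail", PySem.Str.slice fact_summary none (some 80))])]
  else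
    match pvFindBack (PySem.Str.split₀ fact_summary).reverse with
    | some c => [(c, [("Status", "Noted")])]
    | none => [(bucket_name, [("Status", "Noted")])]

-- ===== PRECONDITION & SPEC =====
def Spec_build_minimal_node_py (fact_summary : String) (bucket_name : String) (out : List (String × List (String × String))) : Prop := out = build_minimal_node_py_alt fact_summary bucket_name
instance (fact_summary : String) (bucket_name : String) (out : List (String × List (String × String))) : Decidable (Spec_build_minimal_node_py fact_summary bucket_name out) := by unfold Spec_build_minimal_node_py; infer_instance

-- ===== CLAIM (what is proved, stated in full; the proofs are below) =====
def Claim_equal_build_minimal_node_py : Prop := ∀ (fact_summary : String) (bucket_name : String), Dom_build_minimal_node_py fact_summary bucket_name → Spec_build_minimal_node_py fact_summary bucket_name (build_minimal_node_py fact_summary bucket_name)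

-- ===== LEMMAS AND PROOFS =====

-- B's scanner is find?-then-strip
theorem pvFindBack_eq (m : List String) :
    pvFindBack m = (m.find? pvPred).map pvStrip := by
  induction m with
  | nil => rfl
  | cons w rest ih =>
    by_cases h : pvPred w = true <;> simp [pvFindBack, h, ih]

-- first match of a filter-then-map
theorem head?_filter_map (m : List String) :
    ((m.filter pvPred).map pvStrip).head? = (m.find? pvPred).map pvStrip := by
  induction m with
  | nil => rfl
  | cons w rest ih =>
    by_cases h : pvPred w = true <;> simp [h, ih]

-- Python's xs[-1] is getLast? (none on the empty list)
theorem pyGet?_neg_one {α : Type} (xs : List α) :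
    PySem.List.pyGet? xs (-1) = xs.getLast? := by
  cases xs with
  | nil => rfl
  | cons x rest =>
    simp [PySem.List.pyGet?, PySem.List.pyIdx?, List.getLast?_eq_getElem?]

theorem last_candidate (l : List String) :
    PySem.List.pyGet? ((l.filter pvPred).map pvStrip) (-1) = pvFindBack l.reverse := by
  rw [pyGet?_neg_one, pvFindBack_eq, ← head?_filter_map, ← List.head?_reverse,
      ← List.map_reverse, ← List.filter_reverse]

-- ===== VERDICT (by name: the statement is the Claim_ definition above) =====
theorem build_minimal_node_py_spec : Claim_equal_build_minimal_node_py := by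
  intro fs bn _
  unfold Spec_build_minimal_node_py build_minimal_node_py build_minimal_node_py_alt
  by_cases h : bn == "Work"
  · simp [h]
  · simp only [h, if_false, Bool.false_eq_true]
    rw [last_candidate]
    cases pvFindBack (PySem.Str.split₀ fs).reverse <;> rfl
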